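-- pv_equiv track=rewrite | github.com/StijnvdVliet/top2000 | song_ranking.py | get_next_available_rank
-- ===== SOURCE A (Python) =====
-- def get_next_available_rank(ranked_songs):
--     """Find the lowest available rank that isn't taken"""
--     if not ranked_songs:
--         return 1
--
--     # Get all current ranks
--     current_ranks = {song['rank'] for song in ranked_songs}
--
--     # Find the first number from 1 to 2000 that's not in current_ranks
--     for rank in range(1, 2001):
--         if rank not in current_ranks:
--             return rank
--
--     return 2000  # Fallback to 2000 if somehow all ranks are taken
-- ===== SOURCE B (Python) =====
-- def get_next_available_rank(ranked_songs):
--     """Find the lowest available rank that isn't taken"""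
--     cand = 1
--     for r in sorted({song['rank'] for song in ranked_songs}):
--         if r < cand:
--             continue
--         if r > cand:
--             break
--         cand += 1
--     return min(cand, 2000)
-- ===== Notes on version B (the rewrite author's own statement) =====
-- stated objective: alternative
-- what changed: Instead of probing every integer 1..2000 against the set of taken ranks, B sorts the distinct taken ranks once and walks them with a moving candidate, returning min(candidate, 2000); the 2000-iteration membership scan disappears.
import Mathlib
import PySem

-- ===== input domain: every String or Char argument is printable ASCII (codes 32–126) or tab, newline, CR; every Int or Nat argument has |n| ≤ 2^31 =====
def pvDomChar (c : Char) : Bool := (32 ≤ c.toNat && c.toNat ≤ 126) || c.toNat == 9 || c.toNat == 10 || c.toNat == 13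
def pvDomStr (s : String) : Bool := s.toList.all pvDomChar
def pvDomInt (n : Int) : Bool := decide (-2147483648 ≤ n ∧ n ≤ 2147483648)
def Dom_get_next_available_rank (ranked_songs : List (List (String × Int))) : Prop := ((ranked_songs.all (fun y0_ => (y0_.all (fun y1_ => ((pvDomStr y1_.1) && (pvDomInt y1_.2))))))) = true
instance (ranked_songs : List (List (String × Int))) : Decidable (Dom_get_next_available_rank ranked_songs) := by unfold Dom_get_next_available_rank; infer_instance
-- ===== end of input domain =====

-- B replaces A's probe of every integer 1..2000 against the set of taken ranks by one
-- sorted walk over the distinct taken ranks with a moving candidate (alternative algorithm).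


-- ===== PORT A =====
-- song['rank'] in total form; Pre_ guarantees the key exists, so the default 0 is never what is returned
def pvRank (song : List (String × Int)) : Int :=
  ((PySem.Dict.ofList song).get? "rank").getD 0

-- the 'for rank in range(1, 2001): if rank not in current_ranks: return rank / return 2000' loop
def pvLoopA (ranks : List Int) (current_ranks : PySem.Set Int) : Int :=
  match ranks with
  | [] => 2000
  | r :: rest => if r ∈ current_ranks then pvLoopA rest current_ranks else r

def get_next_available_rank (ranked_songs : List (List (String × Int))) : Int :=
  if ranked_songs = [] then 1
  else
    let current_ranks : PySem.Set Int := PySem.Set.ofList (ranked_songs.map pvRank)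
    pvLoopA (PySem.List.pyRange 1 2001 1) current_ranks

-- ===== PORT B =====
-- the 'for r in sorted({...}): continue/break/cand += 1' walk of Source B
def pvWalk (l : List Int) (cand : Int) : Int :=
  match l with
  | [] => cand
  | r :: rest =>
    if r < cand then pvWalk rest cand
    else if r > cand then cand
    else pvWalk rest (cand + 1)

def get_next_available_rank_alt (ranked_songs : List (List (String × Int))) : Int :=
  let taken : PySem.Set Int := PySem.Set.ofList (ranked_songs.map pvRank)
  let cand := pvWalk (PySem.List.sorted taken (fun x => x) false) 1
  min cand 2000

-- ===== PRECONDITION & SPEC =====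
-- Pre_ excludes exactly the inputs where some song lacks the key "rank": there Python A raises KeyError.
def Pre_get_next_available_rank (ranked_songs : List (List (String × Int))) : Prop :=
  (ranked_songs.all (fun song => song.any (fun p => p.1 == "rank"))) = true
instance (ranked_songs : List (List (String × Int))) : Decidable (Pre_get_next_available_rank ranked_songs) := by unfold Pre_get_next_available_rank; infer_instance
def pvWitness_get_next_available_rank : (List (List (String × Int))) := [[("rank", 1)], [("rank", 3)]]

def Spec_get_next_available_rank (ranked_songs : List (List (String × Int))) (out : Int) : Prop := out = get_next_available_rank_alt ranked_songs
instance (ranked_songs : List (List (String × Int))) (out : Int) : Decidable (Spec_get_next_available_rank ranked_songs out) := by unfold Spec_get_next_available_rank; infer_instance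

-- ===== CLAIM (what is proved, stated in full; the proofs are below) =====
def Claim_equal_get_next_available_rank : Prop := ∀ (ranked_songs : List (List (String × Int))), Dom_get_next_available_rank ranked_songs → Pre_get_next_available_rank ranked_songs → Spec_get_next_available_rank ranked_songs (get_next_available_rank ranked_songs)

-- ===== LEMMAS AND PROOFS =====

-- The walk over a ≤-sorted list returns the least integer ≥ cand that is not in the list.
theorem pvWalk_props (l : List Int) : ∀ (c : Int), l.Pairwise (· ≤ ·) →
    c ≤ pvWalk l c ∧ pvWalk l c ∉ l ∧ ∀ k, c ≤ k → k < pvWalk l c → k ∈ l := by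
  induction l with
  | nil => intro c _; exact ⟨le_refl c, by simp [pvWalk], fun k hk hk' => absurd hk' (by simp [pvWalk] at hk' ⊢; omega)⟩
  | cons r rest ih =>
    intro c hp
    have hrest : rest.Pairwise (· ≤ ·) := (List.pairwise_cons.mp hp).2
    have hhead : ∀ y ∈ rest, r ≤ y := (List.pairwise_cons.mp hp).1
    by_cases h1 : r < c
    · simp only [pvWalk, if_pos h1]
      obtain ⟨hle, hnm, hall⟩ := ih c hrest
      refine ⟨hle, ?_, fun k hk hk' => List.mem_cons_of_mem _ (hall k hk hk')⟩
      intro hmem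
      rcases List.mem_cons.mp hmem with h | h
      · omega
      · exact hnm h
    · by_cases h2 : r > c
      · simp only [pvWalk, if_neg h1, if_pos h2]
        refine ⟨le_refl c, ?_, fun k hk hk' => absurd hk (by omega)⟩
        intro hmem
        rcases List.mem_cons.mp hmem with h | h
        · omega
        · have := hhead c h; omega
      · have hrc : r = c := by omega
        simp only [pvWalk, if_neg h1, if_neg h2]
        obtain ⟨hle, hnm, hall⟩ := ih (c + 1) hrest
        refine ⟨by omega, ?_, ?_⟩
        · intro hmem
          rcases List.mem_cons.mp hmem with h | h
          · omega
          · exact hnm h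
        · intro k hk hk'
          by_cases hkc : k = c
          · exact hkc ▸ (hrc ▸ List.mem_cons_self)
          · exact List.mem_cons_of_mem _ (hall k (by omega) hk')

-- The A-side scan over range(c, 2001) equals min w 2000 when w is the least missing integer ≥ c.
theorem pvLoopA_eq (n : Nat) : ∀ (c : Int), (2001 - c).toNat = n → c ≤ 2001 →
    ∀ (s : PySem.Set Int) (w : Int), c ≤ w → w ∉ s → (∀ k, c ≤ k → k < w → k ∈ s) →
    pvLoopA (PySem.List.pyRange c 2001 1) s = min w 2000 := by
  induction n with
  | zero =>
    intro c hn hc s w hcw hw hall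
    have hc' : c = 2001 := by omega
    rw [PySem.List.pyRange_one_eq_nil (by omega)]
    simp only [pvLoopA]
    omega
  | succ n ih =>
    intro c hn hc s w hcw hw hall
    have hlt : c < 2001 := by omega
    rw [PySem.List.pyRange_one_cons hlt]
    simp only [pvLoopA]
    by_cases hm : c ∈ s
    · rw [if_pos hm]
      have hcw' : c < w := by
        rcases lt_or_eq_of_le hcw with h | h
        · exact h
        · exact absurd (h ▸ hm) hw
      exact ih (c + 1) (by omega) (by omega) s w (by omega) hw (fun k hk hk' => hall k (by omega) hk')
    · rw [if_neg hm]
      have : w = c := by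
        rcases lt_or_eq_of_le hcw with h | h
        · exact absurd (hall c (le_refl c) h) hm
        · omega
      omega

-- ===== VERDICT (by name: the statement is the Claim_ definition above) =====
theorem get_next_available_rank_spec : Claim_equal_get_next_available_rank := by
  intro rs _hdom _hpre
  unfold Spec_get_next_available_rank
  by_cases hnil : rs = []
  · subst hnil; decide
  · unfold get_next_available_rank get_next_available_rank_alt
    rw [if_neg hnil]
    set S : PySem.Set Int := PySem.Set.ofList (rs.map pvRank) with hS
    set l : List Int := PySem.List.sorted S (fun x => x) false with hl
    have hpw : l.Pairwise (· ≤ ·) := PySem.List.sorted_pairwise S (fun x => x)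
    have hmem : ∀ x : Int, x ∈ l ↔ x ∈ S := fun x => PySem.List.mem_sorted S (fun x => x) false x
    obtain ⟨h1, h2, h3⟩ := pvWalk_props l 1 hpw
    exact pvLoopA_eq 2000 1 (by decide) (by decide) S (pvWalk l 1) h1
      (fun h => h2 ((hmem _).mpr h))
      (fun k hk hk' => (hmem k).mp (h3 k hk hk'))
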